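-- pv_equiv track=rewrite | github.com/mnigmann/reverse-engineering | find_loops.py | find_connected_line
-- ===== SOURCE A (Python) =====
-- def find_connected_line(arr, rn, cn):
--     width = len(arr[0])
--     start = 0
--     stop = width
--     for x in range(cn + 1, width):
--         if arr[rn][x] != 1:
--             stop = x
--             break
--     for x in range(cn-1, -1, -1):
--         if arr[rn][x] != 1:
--             start = x+1
--             break
--     return start, stop
-- ===== SOURCE B (Python) =====
-- def find_connected_line(arr, rn, cn):
--     row = arr[rn]
--     width = len(arr[0])
--     breaks = [x for x in range(width) if row[x] != 1]
--     stop = next((x for x in breaks if x > cn), width)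
--     start = next((x for x in reversed(breaks) if x < cn), -1) + 1
--     return start, stop
-- ===== Notes on version B (the rewrite author's own statement) =====
-- stated objective: alternative
-- what changed: Replaced A's two early-exit directional scans (rightward from cn+1, leftward from cn-1) with a single pass that collects the row's break indices (values != 1) and then selects the first break right of cn (default width) and last break left of cn plus one (default 0).
-- outside the precondition, e.g. on find_connected_line([[1, 1, 1], [0, 0]], 1, 0): A returns (0, 1), B raises IndexError; on find_connected_line([[1, 0]], 0, -3): A returns (0, -1), B returns (0, 1); on find_connected_line([[], []], 5, 0): A returns (0, 0), B raises IndexError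
import Mathlib
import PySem

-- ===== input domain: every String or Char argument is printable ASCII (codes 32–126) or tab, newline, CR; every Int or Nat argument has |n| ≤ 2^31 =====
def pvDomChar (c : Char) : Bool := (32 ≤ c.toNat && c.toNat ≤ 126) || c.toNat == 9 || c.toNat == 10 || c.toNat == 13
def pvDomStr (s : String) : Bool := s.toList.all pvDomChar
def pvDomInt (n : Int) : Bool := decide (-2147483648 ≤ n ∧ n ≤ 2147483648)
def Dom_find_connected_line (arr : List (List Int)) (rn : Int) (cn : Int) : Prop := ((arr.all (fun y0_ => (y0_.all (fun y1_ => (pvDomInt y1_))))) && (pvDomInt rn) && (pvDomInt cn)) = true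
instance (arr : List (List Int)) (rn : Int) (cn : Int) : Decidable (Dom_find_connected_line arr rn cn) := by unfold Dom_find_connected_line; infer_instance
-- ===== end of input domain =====

-- B replaces A's two early-exit directional scans with one pass collecting the break
-- indices of the row followed by boundary selection (first break right of cn / last
-- break left of cn); objective: alternative decomposition, same O(width) cost.

-- ===== PORT A =====
-- first loop: for x in range(cn+1, width): if arr[rn][x] != 1: stop = x; break
def fclStopLoop (row : List Int) (xs : List Int) (width : Int) : Int :=
  match xs with
  | [] => width
  | x :: rest => if PySem.List.pyGetD row x 0 ≠ 1 then x else fclStopLoop row rest width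

-- second loop: for x in range(cn-1, -1, -1): if arr[rn][x] != 1: start = x+1; break
def fclStartLoop (row : List Int) (xs : List Int) : Int :=
  match xs with
  | [] => 0
  | x :: rest => if PySem.List.pyGetD row x 0 ≠ 1 then x + 1 else fclStartLoop row rest

def find_connected_line (arr : List (List Int)) (rn : Int) (cn : Int) : Int × Int :=
  let width : Int := ((arr.headD []).length : Int)
  let row := PySem.List.pyGetD arr rn []
  let stop := fclStopLoop row (PySem.List.pyRange (cn + 1) width 1) width
  let start := fclStartLoop row (PySem.List.pyRange (cn - 1) (-1) (-1))
  (start, stop)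

-- ===== PORT B =====
def find_connected_line_alt (arr : List (List Int)) (rn : Int) (cn : Int) : Int × Int :=
  let row := PySem.List.pyGetD arr rn []
  let width : Int := ((arr.headD []).length : Int)
  let breaks := (PySem.List.pyRange 0 width 1).filter (fun x => PySem.List.pyGetD row x 0 ≠ 1)
  let stop := (breaks.find? (fun x => decide (cn < x))).getD width
  let start := ((breaks.reverse.find? (fun x => decide (x < cn))).getD (-1)) + 1
  (start, stop)

-- ===== PRECONDITION & SPEC =====
-- Pre_ excludes inputs where A raises IndexError (empty arr, rn out of range, a row
-- shorter than width reached by a scan) and inputs with cn outside [-1, width], where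
-- A's values arise from Python's accidental negative-index wraparound.
def Pre_find_connected_line (arr : List (List Int)) (rn : Int) (cn : Int) : Prop :=
  arr ≠ [] ∧ PySem.Raise.InRange arr.length rn ∧ -1 ≤ cn ∧
  cn ≤ ((arr.headD []).length : Int) ∧
  (arr.headD []).length ≤ (PySem.List.pyGetD arr rn []).length
instance (arr : List (List Int)) (rn : Int) (cn : Int) : Decidable (Pre_find_connected_line arr rn cn) := by unfold Pre_find_connected_line; infer_instance

def pvWitness_find_connected_line : List (List Int) × Int × Int := ([[1, 1, 0]], 0, 1)

def Spec_find_connected_line (arr : List (List Int)) (rn : Int) (cn : Int) (out : Int × Int) : Prop := out = find_connected_line_alt arr rn cn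
instance (arr : List (List Int)) (rn : Int) (cn : Int) (out : Int × Int) : Decidable (Spec_find_connected_line arr rn cn out) := by unfold Spec_find_connected_line; infer_instance

-- ===== CLAIM (what is proved, stated in full; the proofs are below) =====
def Claim_equal_find_connected_line : Prop := ∀ (arr : List (List Int)) (rn : Int) (cn : Int), Dom_find_connected_line arr rn cn → Pre_find_connected_line arr rn cn → Spec_find_connected_line arr rn cn (find_connected_line arr rn cn)

-- ===== LEMMAS AND PROOFS =====

-- A's first loop is find?-with-default over its index list
theorem fclStopLoop_eq_find? (row xs : List Int) (w : Int) :
    fclStopLoop row xs w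
      = ((xs.find? (fun x => decide (PySem.List.pyGetD row x 0 ≠ 1))).getD w) := by
  induction xs with
  | nil => rfl
  | cons x rest ih =>
    simp only [fclStopLoop, List.find?]
    by_cases h : PySem.List.pyGetD row x 0 ≠ 1 <;> simp [h, ih]

-- A's second loop is find?-then-(+1)-with-default-0 over its index list
theorem fclStartLoop_eq_find? (row xs : List Int) :
    fclStartLoop row xs
      = (((xs.find? (fun x => decide (PySem.List.pyGetD row x 0 ≠ 1))).map (· + 1)).getD 0) := by
  induction xs with
  | nil => rfl
  | cons x rest ih =>
    simp only [fclStartLoop, List.find?]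
    by_cases h : PySem.List.pyGetD row x 0 ≠ 1 <;> simp [h, ih]

-- searching a p-filtered list for q = searching a q-filtered list for p
theorem find?_filter_comm (l : List Int) (p q : Int → Bool) :
    (l.filter p).find? q = (l.filter q).find? p := by
  induction l with
  | nil => rfl
  | cons x rest ih =>
    by_cases hp : p x <;> by_cases hq : q x <;>
      simp [hp, hq, ih]

-- the upper scan's index list is the >cn part of [0, width)
theorem pyRange_upper_eq_filter (cn w : Int) (h1 : -1 ≤ cn) :
    PySem.List.pyRange (cn + 1) w 1
      = (PySem.List.pyRange 0 w 1).filter (fun x => decide (cn < x)) := by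
  by_cases h : cn + 1 ≤ w
  · rw [PySem.List.pyRange_one_append 0 (cn + 1) w (by omega) h,
        List.filter_append]
    have e1 : (PySem.List.pyRange 0 (cn + 1) 1).filter (fun x => decide (cn < x)) = [] := by
      rw [List.filter_eq_nil_iff]
      intro x hx
      have := (PySem.List.mem_pyRange_one).1 hx
      simp; omega
    have e2 : (PySem.List.pyRange (cn + 1) w 1).filter (fun x => decide (cn < x))
        = PySem.List.pyRange (cn + 1) w 1 := by
      rw [List.filter_eq_self]
      intro x hx
      have := (PySem.List.mem_pyRange_one).1 hx
      simp; omega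
    rw [e1, e2, List.nil_append]
  · rw [PySem.List.pyRange_one_eq_nil (by omega)]
    symm; rw [List.filter_eq_nil_iff]
    intro x hx
    have := (PySem.List.mem_pyRange_one).1 hx
    simp; omega

-- the downward scan's index list is the reverse of the <cn part of [0, width)
theorem pyRange_lower_eq_filter (cn w : Int) (h1 : -1 ≤ cn) (h2 : cn ≤ w) :
    PySem.List.pyRange (cn - 1) (-1) (-1)
      = ((PySem.List.pyRange 0 w 1).filter (fun x => decide (x < cn))).reverse := by
  have hr : PySem.List.pyRange (cn - 1) (-1) (-1) = (PySem.List.pyRange 0 cn 1).reverse := by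
    rw [PySem.List.pyRange_neg_one_eq_reverse]
    norm_num
  rw [hr]
  congr 1
  by_cases h : 0 ≤ cn
  · rw [PySem.List.pyRange_one_append 0 cn w h h2, List.filter_append]
    have e1 : (PySem.List.pyRange 0 cn 1).filter (fun x => decide (x < cn))
        = PySem.List.pyRange 0 cn 1 := by
      rw [List.filter_eq_self]
      intro x hx
      have := (PySem.List.mem_pyRange_one).1 hx
      simp; omega
    have e2 : (PySem.List.pyRange cn w 1).filter (fun x => decide (x < cn)) = [] := by
      rw [List.filter_eq_nil_iff]
      intro x hx
      have := (PySem.List.mem_pyRange_one).1 hx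
      simp; omega
    rw [e1, e2, List.append_nil]
  · rw [PySem.List.pyRange_one_eq_nil (by omega)]
    symm; rw [List.filter_eq_nil_iff]
    intro x hx
    have := (PySem.List.mem_pyRange_one).1 hx
    simp; omega

-- ===== VERDICT (by name: the statement is the Claim_ definition above) =====
theorem find_connected_line_spec : Claim_equal_find_connected_line := by
  intro arr rn cn _ hpre
  obtain ⟨_, _, hcn1, hcn2, _⟩ := hpre
  unfold Spec_find_connected_line find_connected_line find_connected_line_alt
  set row := PySem.List.pyGetD arr rn [] with hrow
  set w : Int := ((arr.headD []).length : Int) with hw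
  set p : Int → Bool := fun x => decide (PySem.List.pyGetD row x 0 ≠ 1) with hp
  simp only
  rw [Prod.mk.injEq]
  constructor
  · -- start component
    rw [fclStartLoop_eq_find?, pyRange_lower_eq_filter cn w hcn1 hcn2,
        ← List.filter_reverse, find?_filter_comm, List.filter_reverse]
    cases ((PySem.List.pyRange 0 w 1).filter p).reverse.find? (fun x => decide (x < cn)) <;> simp
  · -- stop component
    rw [fclStopLoop_eq_find?, pyRange_upper_eq_filter cn w hcn1, find?_filter_comm]
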